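-- pv_equiv track=rewrite | github.com/vibhor-vibhav-au6/APJKalam | week6/assignment.py | func
-- ===== SOURCE A (Python) =====
-- d = {}
--
-- def isPrime(num):
--   if num in d:
--     return d[num]
--
--   if num > 1:
--     for i in range(2, int(num/2)+1):
--         if (num % i) == 0:
--             d[num] = False
--             return False
--     else:
--         d[num] = True
--         return True
--   else:
--     return False
--
-- def func(matrix):
--   res = []
--   for i in range(len(matrix)):
--     for j in range(len(matrix[i])):
--       if i != j:
--         if isPrime(matrix[i][j]) == True:
--           res.append(matrix[i][j])
--
--   return res
-- ===== SOURCE B (Python) =====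
-- def _offdiag(matrix):
--     return [x for i, row in enumerate(matrix) for j, x in enumerate(row) if i != j]
--
-- def _is_prime(n):
--     if n < 2:
--         return False
--     k = 2
--     while k * k <= n:
--         if n % k == 0:
--             return False
--         k += 1
--     return True
--
-- def func(matrix):
--     vals = _offdiag(matrix)
--     primes = {x for x in set(vals) if _is_prime(x)}
--     return [x for x in vals if x in primes]
-- ===== Notes on version B (the rewrite author's own statement) =====
-- stated objective: alternative
-- what changed: A tests each off-diagonal entry inline by memoised trial division up to n/2; B collects the off-diagonal values, computes the set of prime values once with sqrt-bounded trial division, and filters the values by membership in that set (a timing run read 1.39x at the largest size, below the 1.5x bar, so no speed is claimed).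
import Mathlib
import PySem

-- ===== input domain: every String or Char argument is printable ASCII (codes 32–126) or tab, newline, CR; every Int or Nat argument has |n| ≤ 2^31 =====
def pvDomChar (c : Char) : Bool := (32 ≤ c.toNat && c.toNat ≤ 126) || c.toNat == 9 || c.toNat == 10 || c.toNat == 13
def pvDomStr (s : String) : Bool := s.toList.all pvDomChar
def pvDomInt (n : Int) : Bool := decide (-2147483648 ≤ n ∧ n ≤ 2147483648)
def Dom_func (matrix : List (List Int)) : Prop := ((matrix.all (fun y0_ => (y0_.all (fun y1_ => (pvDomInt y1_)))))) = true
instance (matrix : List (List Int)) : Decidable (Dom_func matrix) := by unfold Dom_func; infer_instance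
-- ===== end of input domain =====

-- B replaces A's memoised trial division up to n/2 with a two-phase pass: collect the
-- off-diagonal values, compute the set of prime values once by √n-bounded trial division,
-- then filter the values by membership in that set.
-- A mutates a module-level memo dict `d`; the equivalence proved here is about the return value only
-- (the memo only caches deterministic results, so it never changes any return value).


-- ===== PORT A =====
-- the for-loop 'for i in range(2, int(num/2)+1)' with its early `return False` / for-else
-- `return True`; both exits memoise the answer in d before returning. Python's range is lazy,
-- so the loop is ported as a counter recursion (i counts up to the exclusive stop).
def isPrimeLoopA (num : Int) (d : PySem.Dict Int Bool) (i stop : Int) : Bool × PySem.Dict Int Bool :=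
  if i < stop then
    if PySem.Int.mod num i == 0 then (false, d.insert num false)
    else isPrimeLoopA num d (i + 1) stop
  else (true, d.insert num true)
termination_by (stop - i).toNat
decreasing_by omega

-- isPrime(num): the global memo dict is threaded explicitly; int(num/2) is truncdiv (exact, |num| ≤ 2^31 < 2^53)
def isPrimeA (d : PySem.Dict Int Bool) (num : Int) : Bool × PySem.Dict Int Bool :=
  match d.get? num with
  | some b => (b, d)
  | none =>
    if num > 1 then
      isPrimeLoopA num d 2 (PySem.Int.truncdiv num 2 + 1)
    else (false, d)

-- 'for i in range(len(matrix)) / for j in range(len(matrix[i]))' ported via enumerate: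
-- exact, since every index produced by range is in range of its list
def func (matrix : List (List Int)) : List Int :=
  ((PySem.List.enumerate matrix 0).foldl
    (fun st p =>
      (PySem.List.enumerate p.2 0).foldl
        (fun st q =>
          if p.1 != q.1 then
            let r := isPrimeA st.2 q.2
            if r.1 == true then (st.1 ++ [q.2], r.2) else (st.1, r.2)
          else st)
        st)
    (([] : List Int), (PySem.Dict.empty : PySem.Dict Int Bool))).1

-- ===== PORT B =====
-- _offdiag: [x for i, row in enumerate(matrix) for j, x in enumerate(row) if i != j]
def offdiagB (matrix : List (List Int)) : List Int :=
  (PySem.List.enumerate matrix 0).flatMap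
    (fun p => (PySem.List.enumerate p.2 0).filterMap
      (fun q => if p.1 != q.1 then some q.2 else none))

-- the while-loop of _is_prime: while k*k <= n: if n % k == 0: return False; k += 1
def isPrimeLoopB (n k : Int) : Bool :=
  if h : k * k ≤ n then
    if PySem.Int.mod n k == 0 then false
    else isPrimeLoopB n (k + 1)
  else true
termination_by (n + 1 - k).toNat
decreasing_by
  have h1 : 2 * k ≤ n + 1 := by nlinarith [sq_nonneg (k - 1)]
  have h2 : (0:Int) ≤ n := le_trans (mul_self_nonneg k) h
  omega

def isPrimeB (n : Int) : Bool :=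
  if n < 2 then false else isPrimeLoopB n 2

def func_alt (matrix : List (List Int)) : List Int :=
  let vals := offdiagB matrix
  let primes : PySem.Set Int := (PySem.Set.ofList vals).filter (fun x => isPrimeB x)
  vals.filter (fun x => primes.contains x)

-- ===== PRECONDITION & SPEC =====
def Spec_func (matrix : List (List Int)) (out : List Int) : Prop := out = func_alt matrix
instance (matrix : List (List Int)) (out : List Int) : Decidable (Spec_func matrix out) := by unfold Spec_func; infer_instance

-- ===== CLAIM (what is proved, stated in full; the proofs are below) =====
def Claim_equal_func : Prop := ∀ (matrix : List (List Int)), Dom_func matrix → Spec_func matrix (func matrix)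

-- ===== LEMMAS AND PROOFS =====

-- the mathematical primality predicate both tests compute
def goodP (x : Int) : Bool := decide (1 < x ∧ Nat.Prime x.toNat)

-- a composite n ≥ 2 has a divisor in [2, n/2]
lemma exists_small_div {n : Nat} (h2 : 2 ≤ n) (hnp : ¬ Nat.Prime n) :
    ∃ m : Nat, 2 ≤ m ∧ m ≤ n / 2 ∧ m ∣ n := by
  refine ⟨n.minFac, (Nat.minFac_prime (by omega)).two_le, ?_, Nat.minFac_dvd n⟩
  calc n.minFac ≤ n / n.minFac := Nat.minFac_le_div (by omega) hnp
    _ ≤ n / 2 := Nat.div_le_div_left (Nat.minFac_prime (by omega)).two_le (by omega)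

-- a composite n ≥ 2 has a divisor m with 2 ≤ m and m*m ≤ n
lemma exists_sqrt_div {n : Nat} (h2 : 2 ≤ n) (hnp : ¬ Nat.Prime n) :
    ∃ m : Nat, 2 ≤ m ∧ m * m ≤ n ∧ m ∣ n := by
  refine ⟨n.minFac, (Nat.minFac_prime (by omega)).two_le, ?_, Nat.minFac_dvd n⟩
  have := Nat.minFac_sq_le_self (by omega) hnp
  nlinarith [this]

-- a prime has no divisor in [2, n-1]
lemma prime_no_mid_div {n m : Nat} (hp : Nat.Prime n) (h2 : 2 ≤ m) (hlt : m < n) : ¬ m ∣ n := by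
  intro hdvd
  rcases (Nat.Prime.eq_one_or_self_of_dvd hp m hdvd) with h | h <;> omega

-- Int divisibility transfers to toNat for positive operands
lemma int_dvd_toNat {i n : Int} (hi : 0 < i) (hn : 0 ≤ n) : i ∣ n ↔ i.toNat ∣ n.toNat := by
  have := Int.natCast_dvd_natCast (m := i.toNat) (n := n.toNat)
  rw [Int.toNat_of_nonneg hi.le, Int.toNat_of_nonneg hn] at this
  exact this

-- A's loop: scans the range [i, stop), memoises and returns whether no element divides num
lemma isPrimeLoopA_eq_aux (num : Int) (d : PySem.Dict Int Bool) :
    ∀ (m : Nat) (i stop : Int), (stop - i).toNat ≤ m →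
      isPrimeLoopA num d i stop =
        ((PySem.List.pyRange i stop 1).all (fun j => !(PySem.Int.mod num j == 0)),
         d.insert num ((PySem.List.pyRange i stop 1).all (fun j => !(PySem.Int.mod num j == 0)))) := by
  intro m
  induction m with
  | zero =>
    intro i stop hm
    rw [isPrimeLoopA.eq_def, if_neg (by omega), PySem.List.pyRange_one_eq_nil (by omega)]
    simp
  | succ m ih =>
    intro i stop hm
    rw [isPrimeLoopA.eq_def]
    by_cases hlt : i < stop
    · rw [if_pos hlt, PySem.List.pyRange_one_cons hlt]
      by_cases h : PySem.Int.mod num i == 0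
      · simp [h]
      · rw [if_neg h, ih (i + 1) stop (by omega)]
        simp [h]
    · rw [if_neg hlt, PySem.List.pyRange_one_eq_nil (by omega)]
      simp

lemma isPrimeLoopA_eq (num : Int) (d : PySem.Dict Int Bool) (i stop : Int) :
    isPrimeLoopA num d i stop =
      ((PySem.List.pyRange i stop 1).all (fun j => !(PySem.Int.mod num j == 0)),
       d.insert num ((PySem.List.pyRange i stop 1).all (fun j => !(PySem.Int.mod num j == 0)))) :=
  isPrimeLoopA_eq_aux num d (stop - i).toNat i stop (le_refl _)

-- A's trial range decides primality
lemma rangeA_eq_good (num : Int) (h1 : 1 < num) :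
    ((PySem.List.pyRange 2 (PySem.Int.truncdiv num 2 + 1) 1).all
      (fun i => !(PySem.Int.mod num i == 0))) = goodP num := by
  have hnum2 : 2 ≤ num.toNat := by omega
  have htr : PySem.Int.truncdiv num 2 = num / 2 := by
    unfold PySem.Int.truncdiv
    rw [Int.tdiv_eq_ediv, if_pos (Or.inl (by omega : (0:Int) ≤ num))]
    ring
  simp only [goodP]
  rw [Bool.eq_iff_iff, List.all_eq_true, decide_eq_true_eq]
  constructor
  · intro hall
    refine ⟨h1, ?_⟩
    by_contra hnp
    obtain ⟨m, hm2, hmle, hmdvd⟩ := exists_small_div hnum2 hnp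
    have hmle' : ((m : Nat) : Int) ≤ num / 2 := by
      have h1' : ((m : Nat) : Int) ≤ ((num.toNat / 2 : Nat) : Int) := by exact_mod_cast hmle
      have h2' : ((num.toNat / 2 : Nat) : Int) = num / 2 := by omega
      omega
    have hmem : ((m : Nat) : Int) ∈ PySem.List.pyRange 2 (PySem.Int.truncdiv num 2 + 1) 1 := by
      rw [PySem.List.mem_pyRange_one, htr]
      exact ⟨by exact_mod_cast hm2, by omega⟩
    have := hall _ hmem
    rw [Bool.not_eq_eq_eq_not, Bool.not_true, beq_eq_false_iff_ne] at this
    apply this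
    rw [PySem.Int.mod_eq_zero_iff_dvd]
    rw [int_dvd_toNat (by exact_mod_cast (by omega : 0 < m)) (by omega)]
    simpa using hmdvd
  · rintro ⟨-, hp⟩ i hi
    rw [PySem.List.mem_pyRange_one, htr] at hi
    rw [Bool.not_eq_eq_eq_not, Bool.not_true, beq_eq_false_iff_ne]
    intro hmod
    rw [PySem.Int.mod_eq_zero_iff_dvd] at hmod
    have hi0 : 0 < i := by omega
    rw [int_dvd_toNat hi0 (by omega)] at hmod
    have h2i : 2 ≤ i.toNat := by omega
    have hilt : i.toNat < num.toNat := by omega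
    exact prime_no_mid_div hp h2i hilt hmod

-- isPrimeA computes goodP and preserves the memo invariant
def InvD (d : PySem.Dict Int Bool) : Prop := ∀ k b, d.get? k = some b → b = goodP k

lemma isPrimeA_eq (d : PySem.Dict Int Bool) (num : Int) (hd : InvD d) :
    (isPrimeA d num).1 = goodP num ∧ InvD (isPrimeA d num).2 := by
  unfold isPrimeA
  cases hg : d.get? num with
  | some b => exact ⟨hd num b hg, fun k c hk => hd k c hk⟩
  | none =>
    by_cases h1 : num > 1
    · simp only [h1, if_true]
      rw [isPrimeLoopA_eq, rangeA_eq_good num h1]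
      refine ⟨rfl, ?_⟩
      intro k b hk
      dsimp only at hk
      by_cases hkn : k = num
      · subst hkn
        rw [PySem.Dict.get?_insert_self] at hk
        exact (Option.some_inj.mp hk).symm
      · rw [PySem.Dict.get?_insert_of_ne _ _ hkn] at hk
        exact hd k b hk
    · simp only [h1, if_false]
      refine ⟨?_, hd⟩
      simp only [goodP]
      have : ¬ (1 < num ∧ Nat.Prime num.toNat) := fun h => h1 h.1
      simp [this]

-- B's loop returns true iff no j in [k, √n] divides n (strong induction on the loop measure)
lemma isPrimeLoopB_iff_aux (n : Int) :
    ∀ (m : Nat) (k : Int), 2 ≤ k → (n + 1 - k).toNat ≤ m →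
      (isPrimeLoopB n k = true ↔ ∀ j : Int, k ≤ j → j * j ≤ n → ¬ j ∣ n) := by
  intro m
  induction m with
  | zero =>
    intro k hk2 hk
    have hkn : n < k := by omega
    have hvac : ∀ j : Int, k ≤ j → ¬ j * j ≤ n := by
      intro j hj hjj
      nlinarith
    rw [isPrimeLoopB.eq_def, dif_neg (hvac k (le_refl k))]
    refine iff_of_true rfl ?_
    intro j hj hjj
    exact absurd hjj (hvac j hj)
  | succ m ih =>
    intro k hk2 hk
    rw [isPrimeLoopB.eq_def]
    by_cases h : k * k ≤ n
    · have hkle : k ≤ n := by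
        rcases le_or_gt k 0 with hk0 | hk0
        · nlinarith [mul_self_nonneg k]
        · nlinarith
      rw [dif_pos h]
      by_cases hmod : PySem.Int.mod n k == 0
      · rw [if_pos hmod]
        rw [beq_iff_eq, PySem.Int.mod_eq_zero_iff_dvd] at hmod
        refine iff_of_false (by simp) ?_
        intro hc
        exact (hc k (le_refl k) h) hmod
      · rw [if_neg hmod]
        rw [ih (k + 1) (by omega) (by omega)]
        rw [beq_iff_eq] at hmod
        have hndvd : ¬ k ∣ n := by
          rw [← PySem.Int.mod_eq_zero_iff_dvd]; exact hmod
        constructor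
        · intro hall j hj hjj
          rcases eq_or_lt_of_le hj with rfl | hlt
          · exact hndvd
          · exact hall j (by omega) hjj
        · intro hall j hj hjj
          exact hall j (by omega) hjj
    · rw [dif_neg h]
      refine iff_of_true rfl ?_
      intro j hj hjj hdvd
      apply h
      nlinarith

-- B's test computes goodP
lemma isPrimeB_eq (n : Int) : isPrimeB n = goodP n := by
  unfold isPrimeB goodP
  by_cases h2 : n < 2
  · have : ¬ (1 < n ∧ Nat.Prime n.toNat) := fun h => by omega
    simp [h2, this]
  · rw [if_neg (by omega), Bool.eq_iff_iff, decide_eq_true_eq,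
        isPrimeLoopB_iff_aux n (n + 1 - 2).toNat 2 (by omega) (le_refl _)]
    have hn2 : 2 ≤ n.toNat := by omega
    constructor
    · intro hall
      refine ⟨by omega, ?_⟩
      by_contra hnp
      obtain ⟨m, hm2, hmm, hmdvd⟩ := exists_sqrt_div hn2 hnp
      refine hall ((m : Nat) : Int) (by exact_mod_cast hm2) ?_ ?_
      · have h1' : ((m * m : Nat) : Int) ≤ ((n.toNat : Nat) : Int) := by exact_mod_cast hmm
        push_cast at h1'
        omega
      · rw [int_dvd_toNat (by exact_mod_cast (by omega : 0 < m)) (by omega)]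
        simpa using hmdvd
    · rintro ⟨-, hp⟩ j hj hjj hdvd
      have hj0 : 0 < j := by omega
      rw [int_dvd_toNat hj0 (by omega)] at hdvd
      have h2j : 2 ≤ j.toNat := by omega
      have hlt : j.toNat < n.toNat := by
        have hjn : j < n := by nlinarith
        omega
      exact prime_no_mid_div hp h2j hlt hdvd

-- inner loop of A over one enumerated row
lemma funcA_inner (i : Int) (l : List (Int × Int)) (acc : List Int) (d : PySem.Dict Int Bool)
    (hd : InvD d) :
    (l.foldl
      (fun st q =>
        if i != q.1 then
          let r := isPrimeA st.2 q.2
          if r.1 == true then (st.1 ++ [q.2], r.2) else (st.1, r.2)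
        else st) (acc, d)).1
      = acc ++ (l.filterMap (fun q => if i != q.1 then some q.2 else none)).filter goodP ∧
    InvD (l.foldl
      (fun st q =>
        if i != q.1 then
          let r := isPrimeA st.2 q.2
          if r.1 == true then (st.1 ++ [q.2], r.2) else (st.1, r.2)
        else st) (acc, d)).2 := by
  induction l generalizing acc d with
  | nil => simpa using hd
  | cons q rest ih =>
    by_cases hne : i = q.1
    · simpa [List.foldl_cons, List.filterMap_cons, hne] using ih acc d hd
    · obtain ⟨hval, hinv⟩ := isPrimeA_eq d q.2 hd
      by_cases hp : goodP q.2 = true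
      · simpa [List.foldl_cons, List.filterMap_cons, hne, hval, hp] using
          ih (acc ++ [q.2]) (isPrimeA d q.2).2 hinv
      · have hp' : goodP q.2 = false := by simpa using hp
        simpa [List.foldl_cons, List.filterMap_cons, hne, hval, hp'] using
          ih acc (isPrimeA d q.2).2 hinv

-- outer loop of A
lemma funcA_outer (l : List (Int × List Int)) (acc : List Int) (d : PySem.Dict Int Bool)
    (hd : InvD d) :
    (l.foldl
      (fun st p =>
        (PySem.List.enumerate p.2 0).foldl
          (fun st q =>
            if p.1 != q.1 then
              let r := isPrimeA st.2 q.2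
              if r.1 == true then (st.1 ++ [q.2], r.2) else (st.1, r.2)
            else st) st) (acc, d)).1
      = acc ++ (l.flatMap (fun p => (PySem.List.enumerate p.2 0).filterMap
          (fun q => if p.1 != q.1 then some q.2 else none))).filter goodP := by
  induction l generalizing acc d with
  | nil => simp
  | cons p rest ih =>
    obtain ⟨hval, hinv⟩ := funcA_inner p.1 (PySem.List.enumerate p.2 0) acc d hd
    rw [List.foldl_cons]
    rw [show ((PySem.List.enumerate p.2 0).foldl
        (fun st q =>
          if p.1 != q.1 then
            let r := isPrimeA st.2 q.2
            if r.1 == true then (st.1 ++ [q.2], r.2) else (st.1, r.2)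
          else st) (acc, d))
        = (((PySem.List.enumerate p.2 0).foldl (fun st q =>
            if p.1 != q.1 then
              let r := isPrimeA st.2 q.2
              if r.1 == true then (st.1 ++ [q.2], r.2) else (st.1, r.2)
            else st) (acc, d)).1
          , ((PySem.List.enumerate p.2 0).foldl (fun st q =>
            if p.1 != q.1 then
              let r := isPrimeA st.2 q.2
              if r.1 == true then (st.1 ++ [q.2], r.2) else (st.1, r.2)
            else st) (acc, d)).2) from rfl]
    rw [ih _ _ hinv, hval]
    simp [List.filter_append]

-- B's membership filter over the candidate prime set is a pointwise goodP filter
lemma funcB_eq_filter (matrix : List (List Int)) :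
    func_alt matrix = (offdiagB matrix).filter goodP := by
  unfold func_alt
  refine List.filter_congr ?_
  intro x hx
  have hmem : x ∈ PySem.Set.ofList (offdiagB matrix) := by
    rw [PySem.Set.mem_ofList]; exact hx
  cases hp : goodP x with
  | true =>
    have hin : x ∈ ((PySem.Set.ofList (offdiagB matrix)) : List Int).filter (fun y => isPrimeB y) :=
      List.mem_filter.mpr ⟨hmem, by rw [isPrimeB_eq, hp]⟩
    exact List.elem_eq_true_of_mem hin
  | false =>
    have hnotin : x ∉ ((PySem.Set.ofList (offdiagB matrix)) : List Int).filter (fun y => isPrimeB y) := by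
      intro hc
      have := (List.mem_filter.mp hc).2
      rw [isPrimeB_eq, hp] at this
      exact Bool.false_ne_true this
    exact Bool.eq_false_iff.mpr (fun hc => hnotin (List.mem_of_elem_eq_true hc))

-- ===== VERDICT (by name: the statement is the Claim_ definition above) =====
theorem func_spec : Claim_equal_func := by
  intro matrix _
  unfold Spec_func
  rw [funcB_eq_filter]
  unfold func offdiagB
  rw [funcA_outer _ _ _ (fun k b h => by simp [PySem.Dict.get?_empty] at h)]
  simp
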